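-- pv_equiv track=rewrite | github.com/PrabhTheCoder/ITI1120 | LABS/lab6-students/prog-ex-4.py | sum_5_consecutive
-- ===== SOURCE A (Python) =====
-- def sum_5_consecutive(l):
--     """(list of numbers) -> bool
--     Return True if the sum of 5 consecutive numbers in a list is 0
--     otherwise return false.
--     """
--     length = len(l)
--     if length < 5:
--         return False
--     else:
--         for i in range(length):
--             if i + 4 >= length:
--                 break;
--             if l[i] + l[i+1] + l[i+2] + l[i+3] + l[i+4] == 0:
--                 return True
--         return False
-- ===== SOURCE B (Python) =====
-- def sum_5_consecutive(l):
--     n = len(l)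
--     if n < 5:
--         return False
--     p = [0]
--     s = 0
--     for x in l:
--         s += x
--         p.append(s)
--     for i in range(n - 4):
--         if p[i + 5] - p[i] == 0:
--             return True
--     return False
-- ===== Notes on version B (the rewrite author's own statement) =====
-- stated objective: alternative
-- what changed: B builds a prefix-sum table once and tests each window by one subtraction p[i+5]-p[i]==0, instead of A's recomputing the 5-term sum at every position.
import Mathlib
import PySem

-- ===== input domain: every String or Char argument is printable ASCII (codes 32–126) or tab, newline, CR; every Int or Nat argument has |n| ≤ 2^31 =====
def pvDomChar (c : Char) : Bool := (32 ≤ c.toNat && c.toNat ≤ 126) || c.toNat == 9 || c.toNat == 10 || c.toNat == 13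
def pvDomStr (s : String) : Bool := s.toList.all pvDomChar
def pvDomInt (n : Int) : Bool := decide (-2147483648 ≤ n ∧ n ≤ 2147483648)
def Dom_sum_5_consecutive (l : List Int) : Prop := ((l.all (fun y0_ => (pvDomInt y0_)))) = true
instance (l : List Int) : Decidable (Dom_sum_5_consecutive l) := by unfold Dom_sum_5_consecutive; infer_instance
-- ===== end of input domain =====

-- B builds a prefix-sum table and tests each 5-window by one subtraction instead of recomputing the 5-term sum (alternative decomposition, same cost).


-- ===== PORT A =====
-- A's for-loop over range(length) with the break at i+4 >= length and the
-- early return on a zero window, as a tail recursion on the index i.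
def aGo (l : List Int) (n i : Nat) : Bool :=
  if i < n then
    if i + 4 ≥ n then false
    else if l.getD i 0 + l.getD (i+1) 0 + l.getD (i+2) 0 + l.getD (i+3) 0 + l.getD (i+4) 0 = 0 then
      true
    else aGo l n (i+1)
  else false
termination_by n - i

def sum_5_consecutive (l : List Int) : Bool :=
  let length := l.length
  if length < 5 then false
  else aGo l length 0

-- ===== PORT B =====
def sum_5_consecutive_alt (l : List Int) : Bool :=
  let n := l.length
  if n < 5 then false
  else
    -- p = [0]; s = 0; for x in l: s += x; p.append(s)
    let p := (l.foldl (fun ps x => (ps.1 ++ [ps.2 + x], ps.2 + x)) (([0] : List Int), (0 : Int))).1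
    -- for i in range(n-4): if p[i+5]-p[i]==0: return True ... return False
    (List.range (n - 4)).any (fun i => p.getD (i+5) 0 - p.getD i 0 == 0)

-- ===== PRECONDITION & SPEC =====
def Spec_sum_5_consecutive (l : List Int) (out : Bool) : Prop := out = sum_5_consecutive_alt l
instance (l : List Int) (out : Bool) : Decidable (Spec_sum_5_consecutive l out) := by unfold Spec_sum_5_consecutive; infer_instance

-- ===== CLAIM (what is proved, stated in full; the proofs are below) =====
def Claim_equal_sum_5_consecutive : Prop := ∀ (l : List Int), Dom_sum_5_consecutive l → Spec_sum_5_consecutive l (sum_5_consecutive l)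

-- ===== LEMMAS AND PROOFS =====

-- the 5-term window sum starting at j
def W (l : List Int) (j : Nat) : Int :=
  l.getD j 0 + l.getD (j+1) 0 + l.getD (j+2) 0 + l.getD (j+3) 0 + l.getD (j+4) 0

theorem foldl_pref (l : List Int) (acc : List Int) (s : Int) :
    (l.foldl (fun ps x => (ps.1 ++ [ps.2 + x], ps.2 + x)) (acc, s)).1
      = acc ++ (List.scanl (· + ·) s l).tail := by
  induction l generalizing acc s with
  | nil => simp
  | cons x xs ih =>
      simp only [List.foldl_cons, List.scanl_cons]
      rw [ih]
      cases xs <;> simp [List.scanl_cons]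

theorem pref_eq_scanl (l : List Int) :
    (l.foldl (fun ps x => (ps.1 ++ [ps.2 + x], ps.2 + x)) (([0] : List Int), (0 : Int))).1
      = List.scanl (· + ·) 0 l := by
  rw [foldl_pref]
  cases l <;> simp [List.scanl_cons]

theorem scanl_getD (l : List Int) (s : Int) (i : Nat) (h : i ≤ l.length) :
    (List.scanl (· + ·) s l).getD i 0 = s + (l.take i).sum := by
  induction l generalizing s i with
  | nil =>
      have hi : i = 0 := Nat.le_zero.mp h
      subst hi; simp [List.scanl]
  | cons x xs ih =>
      cases i with
      | zero => simp [List.scanl_cons]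
      | succ i =>
          simp only [List.scanl_cons, List.getD_cons_succ]
          rw [ih (s + x) i (by simpa using h)]
          simp [List.take_succ_cons]
          ring

theorem window_sum (l : List Int) (j : Nat) (h : j + 5 ≤ l.length) :
    (l.take (j+5)).sum - (l.take j).sum = W l j := by
  induction j generalizing l with
  | zero =>
      rcases l with _ | ⟨a, _ | ⟨b, _ | ⟨c, _ | ⟨d, _ | ⟨e, rest⟩⟩⟩⟩⟩ <;>
        simp_all [W]; ring
  | succ j ih =>
      rcases l with _ | ⟨x, xs⟩
      · simp at h
      · have h' : j + 5 ≤ xs.length := by simpa using h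
        have := ih xs h'
        simp only [W, List.take_succ_cons, List.sum_cons, List.getD_cons_succ] at *
        omega

theorem any_congr_mem (xs : List Nat) (f g : Nat → Bool)
    (h : ∀ j ∈ xs, f j = g j) : xs.any f = xs.any g := by
  induction xs with
  | nil => rfl
  | cons a t ih => simp_all

theorem aGo_eq (l : List Int) (n i : Nat) :
    aGo l n i = (List.range' i (n - 4 - i)).any (fun j => decide (W l j = 0)) := by
  fun_induction aGo l n i with
  | case1 i h1 h2 =>
      have : n - 4 - i = 0 := by omega
      simp [this]
  | case2 i h1 h2 h3 =>
      have : n - 4 - i = (n - 5 - i) + 1 := by omega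
      rw [this, List.range'_succ]
      simp [W] at h3 ⊢
      left; linarith
  | case3 i h1 h2 h3 ih =>
      have : n - 4 - i = (n - 4 - (i+1)) + 1 := by omega
      rw [this, List.range'_succ, ih]
      simp [W] at h3 ⊢
      intro h; exact absurd h (by intro h'; exact h3 (by linarith))
  | case4 i h1 =>
      have : n - 4 - i = 0 := by omega
      simp [this]

-- ===== VERDICT (by name: the statement is the Claim_ definition above) =====
theorem sum_5_consecutive_spec : Claim_equal_sum_5_consecutive := by
  intro l _
  unfold Spec_sum_5_consecutive sum_5_consecutive sum_5_consecutive_alt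
  simp only
  by_cases h5 : l.length < 5
  · simp [h5]
  · simp only [h5, if_false]
    rw [aGo_eq, pref_eq_scanl]
    have hr : List.range (l.length - 4) = List.range' 0 (l.length - 4) := by
      rw [List.range_eq_range']
    rw [hr]
    apply any_congr_mem
    intro j hj
    have hjlt : j < l.length - 4 := by
      have := List.mem_range'.mp hj; omega
    have h1 : j + 5 ≤ l.length := by omega
    rw [scanl_getD l 0 (j+5) h1, scanl_getD l 0 j (by omega)]
    have hw := window_sum l j h1
    simp only [zero_add]
    rw [hw]
    by_cases hz : W l j = 0 <;> simp [hz]
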